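-- pv_equiv track=rewrite | github.com/Rethy729/Rosalind_BA | BA9/BA9N/BA9N.py | sort_BWT
-- ===== SOURCE A (Python) =====
-- from collections import defaultdict
--
-- def sort_key_2(tuple):
--     return tuple[0].replace('$', ' ')
--
-- def sort_BWT(bwt):
--     bwt_index = []
--     index_dict = defaultdict(int)
--     for letter in bwt:
--         index_dict[letter] += 1
--         bwt_index.append((letter, index_dict[letter]))
--     sort_bwt_index = sorted(bwt_index, key = sort_key_2)
--     return bwt_index, sort_bwt_index
-- ===== SOURCE B (Python) =====
-- # Same result as A, but the sort is replaced by a one-pass stable bucket sort over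
-- # the 128 ASCII codes; the '$' bucket is merged into the space bucket (code 32),
-- # exactly what A's replace-based sort key does.
--
-- def sort_BWT(bwt):
--     bwt_index = []
--     counts = {}
--     for letter in bwt:
--         c = counts.get(letter, 0) + 1
--         counts[letter] = c
--         bwt_index.append((letter, c))
--     buckets = [[] for _ in range(128)]
--     for pair in bwt_index:
--         ch = pair[0]
--         buckets[32 if ch == '$' else ord(ch)].append(pair)
--     sorted_index = []
--     for b in buckets:
--         sorted_index.extend(b)
--     return bwt_index, sorted_index
-- ===== Notes on version B (the rewrite author's own statement) =====
-- stated objective: alternative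
-- what changed: The comparison sort with a replace-based string key is replaced by a one-pass stable bucket sort into 128 ASCII-code buckets ('$' routed into the space bucket) concatenated in code order; no comparison sort is performed.
import Mathlib
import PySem

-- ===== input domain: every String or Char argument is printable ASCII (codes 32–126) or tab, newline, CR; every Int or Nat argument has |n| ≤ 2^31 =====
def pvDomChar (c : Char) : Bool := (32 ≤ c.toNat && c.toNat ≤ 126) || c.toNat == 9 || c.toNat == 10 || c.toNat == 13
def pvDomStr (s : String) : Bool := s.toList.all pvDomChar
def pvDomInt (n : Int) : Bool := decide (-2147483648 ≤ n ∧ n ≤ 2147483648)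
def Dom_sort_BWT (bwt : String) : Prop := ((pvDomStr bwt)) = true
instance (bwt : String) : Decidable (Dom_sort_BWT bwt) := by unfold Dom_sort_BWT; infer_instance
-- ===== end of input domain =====

-- B replaces A's comparison sort (string key with '$'→' ') by a stable bucket pass
-- over the 128 ASCII codes; same return value, no sort performed.

-- ===== PORT A =====
def sort_key_2 (t : String × Int) : String := PySem.Str.replace t.1 "$" " "

def pvStepA (st : List (String × Int) × PySem.Dict String Int) (letter : Char) :
    List (String × Int) × PySem.Dict String Int :=
  let s := String.ofList [letter]
  let d := PySem.Dict.modify st.2 s 0 (· + 1)        -- index_dict[letter] += 1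
  (st.1 ++ [(s, PySem.Dict.getD d s 0)], d)          -- append (letter, index_dict[letter])

def sort_BWT (bwt : String) : (List (String × Int)) × (List (String × Int)) :=
  let bwt_index := (bwt.toList.foldl pvStepA ([], PySem.Dict.empty)).1
  (bwt_index, PySem.List.sorted bwt_index sort_key_2)

-- ===== PORT B =====
-- ord(s) of the single-character strings B stores in bwt_index (headD is exact there);
-- '$' is routed to the space bucket 32 (the inline '32 if ch == '$' else ord(ch)').
def pvBucketCode (s : String) : Int :=
  if s = "$" then 32 else ((s.toList.headD (Char.ofNat 0)).toNat : Int)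

def pvStepB (st : List (String × Int) × PySem.Dict String Int) (letter : Char) :
    List (String × Int) × PySem.Dict String Int :=
  let s := String.ofList [letter]
  let c := PySem.Dict.getD st.2 s 0 + 1              -- c = counts.get(letter, 0) + 1
  (st.1 ++ [(s, c)], PySem.Dict.insert st.2 s c)

def sort_BWT_alt (bwt : String) : (List (String × Int)) × (List (String × Int)) :=
  let bwt_index := (bwt.toList.foldl pvStepB ([], PySem.Dict.empty)).1
  -- buckets = [[] for _ in range(128)]; buckets[code].append(pair)
  -- (the code is an ord(...) value, hence ≥ 0: .toNat is exact as the list index)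
  let buckets := bwt_index.foldl
    (fun (bs : List (List (String × Int))) p =>
      bs.set (pvBucketCode p.1).toNat (bs.getD (pvBucketCode p.1).toNat [] ++ [p]))
    ((List.range 128).map (fun _ => []))
  let sorted_index := buckets.foldl (fun acc b => acc ++ b) []
  (bwt_index, sorted_index)

-- ===== PRECONDITION & SPEC =====
def Spec_sort_BWT (bwt : String) (out : (List (String × Int)) × (List (String × Int))) : Prop := out = sort_BWT_alt bwt
instance (bwt : String) (out : (List (String × Int)) × (List (String × Int))) : Decidable (Spec_sort_BWT bwt out) := by unfold Spec_sort_BWT; infer_instance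

-- ===== CLAIM (what is proved, stated in full; the proofs are below) =====
def Claim_equal_sort_BWT : Prop := ∀ (bwt : String), Dom_sort_BWT bwt → Spec_sort_BWT bwt (sort_BWT bwt)

-- ===== LEMMAS AND PROOFS =====

-- the character A's sort key compares: '$' is replaced by ' '
def pvMap (c : Char) : Char := if c = '$' then ' ' else c

-- bucket c of the index list
def pvG (l : List (String × Int)) (c : Int) : List (String × Int) :=
  l.filter (fun p => pvBucketCode p.1 == c)

lemma pv_singleton_lt (a b : Char) :
    String.ofList [a] < String.ofList [b] ↔ a.toNat < b.toNat := by
  have h0 : (String.ofList [a] < String.ofList [b]) ↔ ([a] : List Char) < [b] := by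
    constructor <;> (intro h; simpa using h)
  rw [h0, List.cons_lt_cons_iff]
  constructor
  · rintro (h | ⟨h1, h2⟩)
    · exact Char.lt_def.mp h
    · exact absurd h2 (lt_irrefl _)
  · intro h; exact Or.inl (Char.lt_def.mpr h)

lemma pv_replace_singleton (c : Char) :
    PySem.Chars.replace [c] ['$'] [' '] = [pvMap c] := by
  by_cases h : c = '$'
  · subst h; decide
  · unfold pvMap
    simp [PySem.Chars.replace, PySem.Chars.replace.go, List.isPrefixOf, h]
    intro h'; exact absurd h'.symm h

lemma pv_key_eq (p : String × Int) (c : Char) (hp : p.1 = String.ofList [c]) :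
    sort_key_2 p = String.ofList [pvMap c] := by
  unfold sort_key_2
  rw [hp]
  simp [PySem.Str.replace, pv_replace_singleton]

lemma pv_code_eq (p : String × Int) (c : Char) (hp : p.1 = String.ofList [c]) :
    pvBucketCode p.1 = ((pvMap c).toNat : Int) := by
  rw [hp]
  unfold pvBucketCode pvMap
  by_cases h : c = '$'
  · subst h; simp
  · have hne : String.ofList [c] ≠ "$" := by
      intro he
      apply h
      have : ([c] : List Char) = ['$'] := by
        have := congrArg String.toList he
        simpa using this
      simpa using this
    simp [hne]
    rw [if_neg h]

lemma pv_before_eq (p q : String × Int) (cp cq : Char)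
    (hp : p.1 = String.ofList [cp]) (hq : q.1 = String.ofList [cq]) :
    decide (sort_key_2 p < sort_key_2 q) = decide (pvBucketCode p.1 < pvBucketCode q.1) := by
  rw [pv_key_eq p cp hp, pv_key_eq q cq hq, pv_code_eq p cp hp, pv_code_eq q cq hq]
  apply decide_eq_decide.mpr
  rw [pv_singleton_lt]
  exact_mod_cast Iff.rfl

lemma pv_insertBy_all_before {α : Type} (b : α → α → Bool) (x : α) (zs : List α)
    (h : ∀ y ∈ zs, b x y = true) : PySem.List.insertBy b x zs = x :: zs := by
  cases zs with
  | nil => rfl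
  | cons y ys => simp [PySem.List.insertBy, h y (List.mem_cons_self)]

lemma pv_insertBy_append_not {α : Type} (b : α → α → Bool) (x : α) (ys zs : List α)
    (h : ∀ y ∈ ys, b x y = false) :
    PySem.List.insertBy b x (ys ++ zs) = ys ++ PySem.List.insertBy b x zs := by
  induction ys with
  | nil => simp
  | cons y ys ih =>
    have hy := h y (List.mem_cons_self)
    simp [PySem.List.insertBy, hy]
    exact ih (fun z hz => h z (List.mem_cons_of_mem _ hz))

lemma pv_G_append (l : List (String × Int)) (x : String × Int) (c : Int) :
    pvG (l ++ [x]) c = pvG l c ++ (if pvBucketCode x.1 == c then [x] else []) := by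
  unfold pvG
  rw [List.filter_append]
  congr 1
  by_cases hxc : pvBucketCode x.1 = c
  · simp [List.filter, hxc]
  · have hf : (pvBucketCode x.1 == c) = false := by simp [hxc]
    simp [List.filter, hf]

lemma pv_mem_G (l : List (String × Int)) (c : Int) (y : String × Int) (hy : y ∈ pvG l c) :
    y ∈ l ∧ pvBucketCode y.1 = c := by
  unfold pvG at hy
  have := List.mem_filter.mp hy
  exact ⟨this.1, by simpa using this.2⟩

lemma pv_insert_buckets (x : String × Int) (l : List (String × Int)) (cs : List Int)
    (hl : ∀ p ∈ l, ∃ c : Char, p.1 = String.ofList [c])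
    (hx : ∃ c : Char, x.1 = String.ofList [c])
    (hmem : pvBucketCode x.1 ∈ cs) (hcs : cs.Pairwise (· < ·)) :
    PySem.List.insertBy (fun a b => decide (sort_key_2 a < sort_key_2 b)) x
      (cs.flatMap (pvG l)) = cs.flatMap (pvG (l ++ [x])) := by
  obtain ⟨cx, hcx⟩ := hx
  have hbefore : ∀ y ∈ l, decide (sort_key_2 x < sort_key_2 y)
      = decide (pvBucketCode x.1 < pvBucketCode y.1) := by
    intro y hy
    obtain ⟨cy, hcy⟩ := hl y hy
    exact pv_before_eq x y cx cy hcx hcy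
  clear hcx
  revert hmem hcs
  induction cs with
  | nil => intro hmem _; simp at hmem
  | cons c cs ih =>
    intro hmem hcs
    rcases List.pairwise_cons.mp hcs with ⟨hclt, hcs'⟩
    rw [List.flatMap_cons, List.flatMap_cons]
    by_cases hc : pvBucketCode x.1 = c
    · have h1 : ∀ y ∈ pvG l c, decide (sort_key_2 x < sort_key_2 y) = false := by
        intro y hy
        obtain ⟨hyl, hyc⟩ := pv_mem_G l c y hy
        rw [hbefore y hyl, hyc, hc]
        simp
      rw [pv_insertBy_append_not _ _ _ _ h1]
      have h2 : ∀ y ∈ cs.flatMap (pvG l), decide (sort_key_2 x < sort_key_2 y) = true := by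
        intro y hy
        obtain ⟨c', hc', hyg⟩ := List.mem_flatMap.mp hy
        obtain ⟨hyl, hyc⟩ := pv_mem_G l c' y hyg
        rw [hbefore y hyl, hyc, hc]
        simpa using hclt c' hc'
      rw [pv_insertBy_all_before _ _ _ h2]
      have h3 : cs.flatMap (pvG (l ++ [x])) = cs.flatMap (pvG l) := by
        have hcong : ∀ c' ∈ cs, pvG (l ++ [x]) c' = pvG l c' := by
          intro c' hc'
          rw [pv_G_append]
          have hne : ¬ (pvBucketCode x.1 == c') = true := by
            have := hclt c' hc'
            simp only [beq_iff_eq]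
            omega
          simp [hne]
        unfold List.flatMap
        rw [List.map_congr_left hcong]
      rw [h3, pv_G_append]
      have ht : (pvBucketCode x.1 == c) = true := by simp [hc]
      rw [ht]
      simp
    · have hx' : pvBucketCode x.1 ∈ cs := by
        rcases List.mem_cons.mp hmem with h | h
        · exact absurd h hc
        · exact h
      have hcltx : c < pvBucketCode x.1 := hclt _ hx'
      have h1 : ∀ y ∈ pvG l c, decide (sort_key_2 x < sort_key_2 y) = false := by
        intro y hy
        obtain ⟨hyl, hyc⟩ := pv_mem_G l c y hy
        rw [hbefore y hyl, hyc]
        simp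
        omega
      rw [pv_insertBy_append_not _ _ _ _ h1, ih hx' hcs']
      have hGc : pvG (l ++ [x]) c = pvG l c := by
        rw [pv_G_append]
        have hne : ¬ (pvBucketCode x.1 == c) = true := by simp [hc]
        simp [hne]
      rw [hGc]

lemma pv_sorted_eq_buckets (l : List (String × Int))
    (hl : ∀ p ∈ l, ∃ c : Char, p.1 = String.ofList [c] ∧ c.toNat < 128) :
    PySem.List.sorted l sort_key_2 = (PySem.List.pyRange 0 128 1).flatMap (pvG l) := by
  induction l using List.reverseRecOn with
  | nil =>
    rw [PySem.List.sorted_eq_foldl_insertBy]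
    simp [pvG]
  | append_singleton l x ih =>
    have hl' : ∀ p ∈ l, ∃ c : Char, p.1 = String.ofList [c] ∧ c.toNat < 128 :=
      fun p hp => hl p (List.mem_append_left _ hp)
    obtain ⟨cx, hcx, hcx128⟩ := hl x (List.mem_append_right _ (List.mem_singleton_self x))
    rw [PySem.List.sorted_eq_foldl_insertBy, List.foldl_append]
    simp only [List.foldl_cons, List.foldl_nil]
    rw [← PySem.List.sorted_eq_foldl_insertBy, ih hl']
    apply pv_insert_buckets
    · intro p hp
      obtain ⟨c, h1, _⟩ := hl' p hp
      exact ⟨c, h1⟩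
    · exact ⟨cx, hcx⟩
    · rw [pv_code_eq x cx hcx, PySem.List.mem_pyRange_one]
      have hb : (pvMap cx).toNat < 128 := by
        unfold pvMap
        split
        · decide
        · exact hcx128
      exact ⟨Int.natCast_nonneg _, by exact_mod_cast hb⟩
    · exact PySem.List.pairwise_lt_pyRange_one 0 128

lemma pv_build_mem (xs : List Char) (st₀ : List (String × Int) × PySem.Dict String Int) :
    ∀ p ∈ (xs.foldl pvStepB st₀).1, p ∈ st₀.1 ∨ ∃ c ∈ xs, p.1 = String.ofList [c] := by
  induction xs generalizing st₀ with
  | nil => intro p hp; exact Or.inl hp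
  | cons y ys ih =>
    intro p hp
    rcases ih (pvStepB st₀ y) p hp with h | ⟨c, hc, hpc⟩
    · unfold pvStepB at h
      rcases List.mem_append.mp h with h' | h'
      · exact Or.inl h'
      · exact Or.inr ⟨y, List.mem_cons_self, by simpa using congrArg Prod.fst (List.mem_singleton.mp h')⟩
    · exact Or.inr ⟨c, List.mem_cons_of_mem _ hc, hpc⟩

lemma pv_getD_map_range {α : Type} (f : Nat → α) (n k : Nat) (hk : k < n) (d : α) :
    (((List.range n).map f).getD k d) = f k := by
  rw [List.getD_eq_getElem _ _ (by simpa using hk)]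
  simp

lemma pv_set_map_range {α : Type} (f : Nat → α) (n k : Nat) (v : α) :
    ((List.range n).map f).set k v
      = (List.range n).map (fun j => if j = k then v else f j) := by
  apply List.ext_getElem (by simp)
  intro j h1 h2
  rw [List.getElem_set]
  simp only [List.getElem_map, List.getElem_range]
  by_cases hj : j = k
  · simp [hj]
  · simp [hj]
    exact fun h => absurd h.symm hj

lemma pv_fill (l pref : List (String × Int))
    (h : ∀ p ∈ l, 0 ≤ pvBucketCode p.1 ∧ pvBucketCode p.1 < 128) :
    l.foldl
      (fun (bs : List (List (String × Int))) p =>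
        bs.set (pvBucketCode p.1).toNat (bs.getD (pvBucketCode p.1).toNat [] ++ [p]))
      ((List.range 128).map (fun c : Nat => pvG pref (c : Int)))
    = (List.range 128).map (fun c : Nat => pvG (pref ++ l) (c : Int)) := by
  induction l generalizing pref with
  | nil => simp
  | cons p l ih =>
    obtain ⟨hp0, hp128⟩ := h p List.mem_cons_self
    have hk : (pvBucketCode p.1).toNat < 128 := by omega
    have hcast : ((pvBucketCode p.1).toNat : Int) = pvBucketCode p.1 := Int.toNat_of_nonneg hp0
    rw [List.foldl_cons]
    rw [pv_getD_map_range _ 128 _ hk, pv_set_map_range]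
    have hstep : (fun (j : Nat) =>
        if j = (pvBucketCode p.1).toNat then pvG pref ((pvBucketCode p.1).toNat : Int) ++ [p]
        else pvG pref (j : Int))
        = fun (j : Nat) => pvG (pref ++ [p]) (j : Int) := by
      funext j
      by_cases hj : j = (pvBucketCode p.1).toNat
      · subst hj
        rw [if_pos rfl, pv_G_append]
        have ht : (pvBucketCode p.1 == (((pvBucketCode p.1).toNat : Nat) : Int)) = true := by
          simp [hcast]
        rw [ht]
        simp
      · rw [if_neg hj, pv_G_append]
        have hf : (pvBucketCode p.1 == ((j : Nat) : Int)) = false := by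
          simp only [beq_eq_false_iff_ne, ne_eq]
          intro he
          exact hj (by omega)
        rw [hf]
        simp
    rw [hstep, ih (pref ++ [p]) (fun q hq => h q (List.mem_cons_of_mem _ hq))]
    simp

lemma pv_alt_snd (idx : List (String × Int))
    (h : ∀ p ∈ idx, 0 ≤ pvBucketCode p.1 ∧ pvBucketCode p.1 < 128) :
    ((idx.foldl
      (fun (bs : List (List (String × Int))) p =>
        bs.set (pvBucketCode p.1).toNat (bs.getD (pvBucketCode p.1).toNat [] ++ [p]))
      ((List.range 128).map (fun _ => []))).foldl (fun acc b => acc ++ b) [])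
    = (PySem.List.pyRange 0 128 1).flatMap (pvG idx) := by
  have h0 : ((List.range 128).map (fun _ => ([] : List (String × Int))))
      = (List.range 128).map (fun c : Nat => pvG ([] : List (String × Int)) (c : Int)) := by
    simp [pvG]
  rw [h0, pv_fill idx [] h, List.nil_append]
  rw [PySem.List.foldl_append_eq_flatMap (fun b => b)]
  have hr : PySem.List.pyRange 0 128 1 = (List.range 128).map (fun c : Nat => (c : Int)) := by
    decide
  rw [List.nil_append, List.flatMap_map, hr, List.flatMap_map]

lemma pv_step_eq : pvStepA = pvStepB := by
  funext st letter
  unfold pvStepA pvStepB PySem.Dict.modify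
  simp [PySem.Dict.getD_insert_self]

-- ===== VERDICT (by name: the statement is the Claim_ definition above) =====
theorem sort_BWT_spec : Claim_equal_sort_BWT := by
  intro bwt hdom
  unfold Spec_sort_BWT sort_BWT sort_BWT_alt
  rw [pv_step_eq]
  have hl : ∀ p ∈ (bwt.toList.foldl pvStepB ([], PySem.Dict.empty)).1,
      ∃ c : Char, p.1 = String.ofList [c] ∧ c.toNat < 128 := by
    intro p hp
    rcases pv_build_mem bwt.toList ([], PySem.Dict.empty) p hp with h | ⟨c, hc, hpc⟩
    · simp at h
    · refine ⟨c, hpc, ?_⟩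
      have := List.all_eq_true.mp hdom c hc
      unfold pvDomChar at this
      simp at this
      omega
  have hcode : ∀ p ∈ (bwt.toList.foldl pvStepB ([], PySem.Dict.empty)).1,
      0 ≤ pvBucketCode p.1 ∧ pvBucketCode p.1 < 128 := by
    intro p hp
    obtain ⟨c, hpc, hc128⟩ := hl p hp
    rw [pv_code_eq p c hpc]
    have hb : (pvMap c).toNat < 128 := by
      unfold pvMap
      split
      · decide
      · exact hc128
    omega
  exact Prod.ext rfl ((pv_sorted_eq_buckets _ hl).trans
    (pv_alt_snd (bwt.toList.foldl pvStepB ([], PySem.Dict.empty)).1 hcode).symm)
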